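-- pv_equiv track=rewrite | github.com/michael-hirschmugl/snes-terminal-bridge | snes/tools/gen_assets.py | dedupe_tiles_8x8
-- ===== SOURCE A (Python) =====
-- def _tile_key(tile):
--     buf = bytearray()
--     for row in tile:
--         buf.extend(row)
--     return bytes(buf)
--
-- def dedupe_tiles_8x8(pixels):
--     """Flip-dedup all 8x8 tiles in `pixels`.
--
--     Returns (unique_tiles, placements). placements[ty][tx] = (index, hflip,
--     vflip) for the tile at cell (tx, ty). unique_tiles is a list of 8x8
--     pixel grids (stored in their first-seen orientation)."""
--     rows = len(pixels) // 8
--     cols = len(pixels[0]) // 8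
--     unique = []
--     key_to_index = {}
--     placements = []
--     for ty in range(rows):
--         placement_row = []
--         for tx in range(cols):
--             tile = [
--                 [pixels[ty * 8 + y][tx * 8 + x] for x in range(8)]
--                 for y in range(8)
--             ]
--             match = None
--             for hf in (0, 1):
--                 for vf in (0, 1):
--                     flipped = tile
--                     if hf:
--                         flipped = [list(reversed(r)) for r in flipped]
--                     if vf:
--                         flipped = list(reversed(flipped))
--                     key = _tile_key(flipped)
--                     if key in key_to_index:
--                         match = (key_to_index[key], hf, vf)
--                         break
--                 if match:
--                     break
--             if match is None:
--                 idx = len(unique)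
--                 unique.append(tile)
--                 key_to_index[_tile_key(tile)] = idx
--                 match = (idx, 0, 0)
--             placement_row.append(match)
--         placements.append(placement_row)
--     return unique, placements
-- ===== SOURCE B (Python) =====
-- def dedupe_tiles_8x8(pixels):
--     """Flip-dedup all 8x8 tiles in `pixels` (same contract as the original).
--
--     Staged re-implementation: (1) extract ALL tiles in row-major order, (2) a
--     single pass resolves each tile with ONE key computation and ONE dict
--     lookup -- the dict indexes every orientation key of each stored unique
--     tile (setdefault in (0,0),(0,1),(1,0),(1,1) order, so a symmetric tile
--     keeps the orientation A's break order would report) -- and (3) the flat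
--     placement list is chunked into rows.  Correct because the four flips are
--     commuting involutions: flip(Q,hf,vf)==T iff Q==flip(T,hf,vf)."""
--     rows = len(pixels) // 8
--     cols = len(pixels[0]) // 8
--     tiles = [
--         [row[tx * 8:tx * 8 + 8] for row in pixels[ty * 8:ty * 8 + 8]]
--         for ty in range(rows)
--         for tx in range(cols)
--     ]
--     unique = []
--     orient = {}  # key of every orientation of each stored tile -> (index, hf, vf)
--     flat = []
--     for tile in tiles:
--         p = orient.get(bytes(v for r in tile for v in r))
--         if p is None:
--             idx = len(unique)
--             unique.append(tile)
--             for hf in (0, 1):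
--                 for vf in (0, 1):
--                     t = [list(reversed(r)) for r in tile] if hf else tile
--                     t = list(reversed(t)) if vf else t
--                     orient.setdefault(bytes(v for r in t for v in r), (idx, hf, vf))
--             p = (idx, 0, 0)
--         flat.append(p)
--     placements = [flat[i * cols:(i + 1) * cols] for i in range(rows)]
--     return unique, placements
-- ===== Notes on version B (the rewrite author's own statement) =====
-- stated objective: alternative
-- what changed: B is staged instead of nested: it first extracts all tiles (by slicing) into one row-major list, then resolves every tile in a single pass with one key build and one dict lookup against a dict indexing all four orientation keys of each stored unique tile (setdefault in A's probe order), and finally chunks the flat placement list into rows - replacing A's nested ty/tx loops that flip each query tile up to four times and probe per orientation.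
-- outside the precondition, e.g. on dedupe_tiles_8x8([]): A raises IndexError, B raises IndexError
import Mathlib
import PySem

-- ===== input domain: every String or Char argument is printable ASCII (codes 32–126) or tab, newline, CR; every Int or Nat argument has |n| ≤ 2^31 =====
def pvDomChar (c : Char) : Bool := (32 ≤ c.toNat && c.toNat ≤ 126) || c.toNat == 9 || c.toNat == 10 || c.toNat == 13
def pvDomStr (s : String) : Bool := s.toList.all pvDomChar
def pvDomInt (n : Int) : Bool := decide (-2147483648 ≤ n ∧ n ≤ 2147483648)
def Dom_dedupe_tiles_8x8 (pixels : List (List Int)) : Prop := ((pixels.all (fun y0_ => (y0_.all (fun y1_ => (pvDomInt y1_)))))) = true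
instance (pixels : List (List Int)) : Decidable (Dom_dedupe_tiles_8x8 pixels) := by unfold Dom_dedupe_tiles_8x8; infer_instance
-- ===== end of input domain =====

-- B is staged instead of nested: extract all tiles, resolve each by one lookup in a dict
-- indexing every orientation of each stored tile, then chunk the flat placements (objective: alternative).

-- ===== PORT A =====
-- _tile_key: concatenation of the rows (bytes modelled as List Int; exact on Pre_'s 0..255 values)
def pvKeyA (tile : List (List Int)) : List Int :=
  tile.foldl (fun buf row => buf ++ row) []

-- the nested 'for hf in (0,1): for vf in (0,1): … break' search, as recursion over the
-- four (hf, vf) pairs in Python's order; 'if hf:' is the Int truthiness test hf ≠ 0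
def pvFlipSearchA (d : PySem.Dict (List Int) Int) (tile : List (List Int)) :
    List (Int × Int) → Option (Int × Int × Int)
  | [] => none
  | (hf, vf) :: rest =>
    let f1 := if hf ≠ 0 then tile.map List.reverse else tile
    let f2 := if vf ≠ 0 then f1.reverse else f1
    match d.get? (pvKeyA f2) with
    | some i => some (i, hf, vf)
    | none => pvFlipSearchA d tile rest

def dedupe_tiles_8x8 (pixels : List (List Int)) :
    List (List (List Int)) × (List (List (Int × Int × Int))) :=
  let rows : Nat := pixels.length / 8
  let cols : Nat := (pixels.headD []).length / 8  -- pixels[0]; IndexError on [] is excluded by Pre_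
  let fin := (List.range rows).foldl
    (fun (st : List (List (List Int)) × PySem.Dict (List Int) Int × List (List (Int × Int × Int))) ty =>
      let inner := (List.range cols).foldl
        (fun (s : List (Int × Int × Int) × List (List (List Int)) × PySem.Dict (List Int) Int) tx =>
          -- tile = [[pixels[ty*8+y][tx*8+x] for x in range(8)] for y in range(8)];
          -- nonnegative in-range indexing under Pre_, so getD is exact here
          let tile := (List.range 8).map (fun y => (List.range 8).map (fun x =>
            (pixels.getD (ty * 8 + y) []).getD (tx * 8 + x) 0))
          match pvFlipSearchA s.2.2 tile [(0, 0), (0, 1), (1, 0), (1, 1)] with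
          | some m => (s.1 ++ [m], s.2.1, s.2.2)
          | none =>
            let idx : Int := s.2.1.length
            (s.1 ++ [(idx, 0, 0)], s.2.1 ++ [tile], s.2.2.insert (pvKeyA tile) idx))
        ([], st.1, st.2.1)
      (inner.2.1, inner.2.2, st.2.2 ++ [inner.1]))
    ([], PySem.Dict.empty, [])
  (fin.1, fin.2.2)

-- ===== PORT B =====
-- bytes(v for r in tile for v in r)
def pvKeyB (tile : List (List Int)) : List Int :=
  tile.flatMap (fun r => r)

-- register all four orientation keys of a freshly stored tile (setdefault keeps first)
def pvOrientInsertB (tile : List (List Int)) (idx : Int)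
    (d : PySem.Dict (List Int) (Int × Int × Int)) : PySem.Dict (List Int) (Int × Int × Int) :=
  [((0 : Int), (0 : Int)), (0, 1), (1, 0), (1, 1)].foldl
    (fun d hv =>
      let t1 := if hv.1 ≠ 0 then tile.map List.reverse else tile
      let t2 := if hv.2 ≠ 0 then t1.reverse else t1
      d.setdefault (pvKeyB t2) (idx, hv.1, hv.2)) d

-- resolve one tile: a single dict lookup; on a miss, store the tile and index its orientations
def pvResolveB
    (st : List (List (List Int)) × PySem.Dict (List Int) (Int × Int × Int) × List (Int × Int × Int))
    (tile : List (List Int)) :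
    List (List (List Int)) × PySem.Dict (List Int) (Int × Int × Int) × List (Int × Int × Int) :=
  match st.2.1.get? (pvKeyB tile) with
  | some p => (st.1, st.2.1, st.2.2 ++ [p])
  | none =>
    let idx : Int := st.1.length
    (st.1 ++ [tile], pvOrientInsertB tile idx st.2.1, st.2.2 ++ [(idx, 0, 0)])

def dedupe_tiles_8x8_alt (pixels : List (List Int)) :
    List (List (List Int)) × (List (List (Int × Int × Int))) :=
  let rows : Nat := pixels.length / 8
  let cols : Nat := (pixels.headD []).length / 8  -- pixels[0]; IndexError on [] is excluded by Pre_
  -- stage 1: every tile, row-major, by slicing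
  let tiles := (List.range rows).flatMap (fun ty =>
    (List.range cols).map (fun tx =>
      (PySem.List.slice pixels (some ((ty * 8 : Nat) : Int)) (some ((ty * 8 + 8 : Nat) : Int))).map
        (fun row => PySem.List.slice row (some ((tx * 8 : Nat) : Int)) (some ((tx * 8 + 8 : Nat) : Int)))))
  -- stage 2: one resolving pass over the flat tile list
  let res := tiles.foldl pvResolveB ([], PySem.Dict.empty, [])
  -- stage 3: chunk the flat placement list into rows of `cols`
  (res.1, (List.range rows).map (fun i =>
    PySem.List.slice res.2.2 (some ((i * cols : Nat) : Int)) (some ((i * cols + cols : Nat) : Int))))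

-- ===== PRECONDITION & SPEC =====
-- Pre_ excludes exactly the inputs where Python A raises: the empty list (pixels[0] → IndexError),
-- a row of the used 8×rows band shorter than the used 8×cols span (IndexError), and a used pixel
-- value outside 0..255 (bytearray.extend → ValueError).
def Pre_dedupe_tiles_8x8 (pixels : List (List Int)) : Prop :=
  pixels ≠ [] ∧ ∀ row ∈ pixels.take (8 * (pixels.length / 8)),
    8 * ((pixels.headD []).length / 8) ≤ row.length ∧
    ∀ v ∈ row.take (8 * ((pixels.headD []).length / 8)), 0 ≤ v ∧ v ≤ 255
instance (pixels : List (List Int)) : Decidable (Pre_dedupe_tiles_8x8 pixels) := by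
  unfold Pre_dedupe_tiles_8x8; infer_instance

def pvWitness_dedupe_tiles_8x8 : List (List Int) :=
  [[0,0,0,0,0,0,0,0],[0,0,0,0,0,0,0,0],[0,0,0,0,0,0,0,0],[0,0,0,0,0,0,0,0],
   [0,1,0,0,0,0,0,0],[0,0,0,0,0,0,0,0],[0,0,0,0,0,0,0,0],[0,0,0,0,0,0,0,0]]

def Spec_dedupe_tiles_8x8 (pixels : List (List Int)) (out : List (List (List Int)) × (List (List (Int × Int × Int)))) : Prop := out = dedupe_tiles_8x8_alt pixels
instance (pixels : List (List Int)) (out : List (List (List Int)) × (List (List (Int × Int × Int)))) : Decidable (Spec_dedupe_tiles_8x8 pixels out) := by unfold Spec_dedupe_tiles_8x8; infer_instance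

-- ===== CLAIM (what is proved, stated in full; the proofs are below) =====
def Claim_equal_dedupe_tiles_8x8 : Prop := ∀ (pixels : List (List Int)), Dom_dedupe_tiles_8x8 pixels → Pre_dedupe_tiles_8x8 pixels → Spec_dedupe_tiles_8x8 pixels (dedupe_tiles_8x8 pixels)

-- ===== LEMMAS AND PROOFS =====

-- ---- proof-side vocabulary ----

-- the flip both Pythons apply (H then V), tile-level
def pvFlip (hf vf : Int) (t : List (List Int)) : List (List Int) :=
  let f1 := if hf ≠ 0 then t.map List.reverse else t
  if vf ≠ 0 then f1.reverse else f1

def pvFL : List (Int × Int) := [(0, 0), (0, 1), (1, 0), (1, 1)]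

def pvShape8 (t : List (List Int)) : Prop := t.length = 8 ∧ ∀ r ∈ t, r.length = 8

-- what A's dict denotes over the stored list u
def pvLookA (u : List (List (List Int))) (key : List Int) : Option Int :=
  u.zipIdx.findSome? (fun p => if pvKeyB p.1 = key then some ((p.2 : Int)) else none)

-- what B's dict denotes over the stored list u
def pvOrientOf (t : List (List Int)) (key : List Int) : Option (Int × Int) :=
  pvFL.findSome? (fun hv => if pvKeyB (pvFlip hv.1 hv.2 t) = key then some hv else none)

def pvLookB (u : List (List (List Int))) (key : List Int) : Option (Int × Int × Int) :=
  u.zipIdx.findSome? (fun p => (pvOrientOf p.1 key).map (fun hv => ((p.2 : Int), hv.1, hv.2)))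

-- the invariant carried by the equivalence induction
def pvGood (u : List (List (List Int))) : Prop :=
  (∀ t ∈ u, pvShape8 t) ∧ u.Nodup ∧
  (∀ t ∈ u, ∀ t' ∈ u, t ≠ t' → ∀ hv ∈ pvFL, pvFlip hv.1 hv.2 t ≠ t')

def pvInvA (d : PySem.Dict (List Int) Int) (u : List (List (List Int))) : Prop :=
  ∀ key, d.get? key = pvLookA u key

def pvInvB (d : PySem.Dict (List Int) (Int × Int × Int)) (u : List (List (List Int))) : Prop :=
  ∀ key, d.get? key = pvLookB u key

-- ---- proof-side step/row helpers (definitionally equal to A's loop bodies; the B-side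
-- nested pvStepB/pvRowB are the intermediate shape the staged port is bridged to) ----

def pvTileOf (pixels : List (List Int)) (ty tx : Nat) : List (List Int) :=
  (PySem.List.slice pixels (some ((ty * 8 : Nat) : Int)) (some ((ty * 8 + 8 : Nat) : Int))).map
    (fun row => PySem.List.slice row (some ((tx * 8 : Nat) : Int)) (some ((tx * 8 + 8 : Nat) : Int)))

def pvStepA (pixels : List (List Int)) (ty : Nat)
    (s : List (Int × Int × Int) × List (List (List Int)) × PySem.Dict (List Int) Int) (tx : Nat) :
    List (Int × Int × Int) × List (List (List Int)) × PySem.Dict (List Int) Int :=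
  match pvFlipSearchA s.2.2 ((List.range 8).map (fun y => (List.range 8).map (fun x =>
      (pixels.getD (ty * 8 + y) []).getD (tx * 8 + x) 0))) [(0, 0), (0, 1), (1, 0), (1, 1)] with
  | some m => (s.1 ++ [m], s.2.1, s.2.2)
  | none =>
    (s.1 ++ [((s.2.1.length : Int), 0, 0)],
     s.2.1 ++ [(List.range 8).map (fun y => (List.range 8).map (fun x =>
       (pixels.getD (ty * 8 + y) []).getD (tx * 8 + x) 0))],
     s.2.2.insert (pvKeyA ((List.range 8).map (fun y => (List.range 8).map (fun x =>
       (pixels.getD (ty * 8 + y) []).getD (tx * 8 + x) 0)))) (s.2.1.length : Int))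

def pvRowA (pixels : List (List Int))
    (st : List (List (List Int)) × PySem.Dict (List Int) Int × List (List (Int × Int × Int))) (ty : Nat) :
    List (List (List Int)) × PySem.Dict (List Int) Int × List (List (Int × Int × Int)) :=
  let inner := (List.range ((pixels.headD []).length / 8)).foldl (pvStepA pixels ty) ([], st.1, st.2.1)
  (inner.2.1, inner.2.2, st.2.2 ++ [inner.1])

def pvStepB (pixels : List (List Int)) (ty : Nat)
    (s : List (Int × Int × Int) × List (List (List Int)) × PySem.Dict (List Int) (Int × Int × Int)) (tx : Nat) :
    List (Int × Int × Int) × List (List (List Int)) × PySem.Dict (List Int) (Int × Int × Int) :=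
  match s.2.2.get? (pvKeyB (pvTileOf pixels ty tx)) with
  | some p => (s.1 ++ [p], s.2.1, s.2.2)
  | none =>
    (s.1 ++ [((s.2.1.length : Int), 0, 0)],
     s.2.1 ++ [pvTileOf pixels ty tx],
     pvOrientInsertB (pvTileOf pixels ty tx) (s.2.1.length : Int) s.2.2)

def pvRowB (pixels : List (List Int))
    (st : List (List (List Int)) × PySem.Dict (List Int) (Int × Int × Int) × List (List (Int × Int × Int))) (ty : Nat) :
    List (List (List Int)) × PySem.Dict (List Int) (Int × Int × Int) × List (List (Int × Int × Int)) :=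
  let inner := (List.range ((pixels.headD []).length / 8)).foldl (pvStepB pixels ty) ([], st.1, st.2.1)
  (inner.2.1, inner.2.2, st.2.2 ++ [inner.1])

-- xor-style combination used to show the four flips are closed under composition
def pvX (x y : Int) : Int := if (x = 0) ↔ (y = 0) then 0 else 1

-- ---- basic facts about keys and flips ----

theorem pvKeyA_eq (t : List (List Int)) : pvKeyA t = pvKeyB t := by
  simpa [pvKeyA, pvKeyB] using PySem.List.foldl_append_eq_flatMap (fun r : List Int => r) t []

theorem pvFlip_zero (t : List (List Int)) : pvFlip 0 0 t = t := by
  simp [pvFlip]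

theorem pvFlip_flip (hf vf : Int) (t : List (List Int)) :
    pvFlip hf vf (pvFlip hf vf t) = t := by
  unfold pvFlip
  by_cases hh : hf ≠ 0 <;> by_cases hv : vf ≠ 0 <;>
    simp [hh, hv, List.map_reverse, List.map_map, List.reverse_reverse]

theorem pvFlip_eq_comm (hf vf : Int) (a b : List (List Int)) :
    pvFlip hf vf a = b ↔ a = pvFlip hf vf b := by
  constructor
  · rintro rfl; exact (pvFlip_flip hf vf a).symm
  · rintro rfl; exact pvFlip_flip hf vf b

theorem pvFlip_comp (a b c d : Int) (t : List (List Int)) :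
    pvFlip c d (pvFlip a b t) = pvFlip (pvX a c) (pvX b d) t := by
  unfold pvFlip pvX
  by_cases ha : a = 0 <;> by_cases hb : b = 0 <;> by_cases hc : c = 0 <;> by_cases hd : d = 0 <;>
    simp [ha, hb, hc, hd, List.map_reverse, List.map_map, List.reverse_reverse]

theorem pvX_pair_mem (x y z w : Int) : (pvX x z, pvX y w) ∈ pvFL := by
  unfold pvX pvFL; split_ifs <;> simp

theorem pvShape8_flip (hf vf : Int) {t : List (List Int)} (h : pvShape8 t) :
    pvShape8 (pvFlip hf vf t) := by
  obtain ⟨h1, h2⟩ := h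
  have hm : pvShape8 (t.map List.reverse) := by
    refine ⟨by simpa using h1, ?_⟩
    intro r hr
    obtain ⟨r0, hr0, rfl⟩ := List.mem_map.mp hr
    simpa using h2 r0 hr0
  have hrev : ∀ s : List (List Int), pvShape8 s → pvShape8 s.reverse := by
    intro s hs
    exact ⟨by simpa using hs.1, fun r hr => hs.2 r (List.mem_reverse.mp hr)⟩
  unfold pvFlip
  split_ifs
  all_goals first
    | exact hrev _ hm
    | exact hm
    | exact hrev _ ⟨h1, h2⟩
    | exact ⟨h1, h2⟩

theorem pv_flat_inj : ∀ (s t : List (List Int)),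
    (∀ r ∈ s, r.length = 8) → (∀ r ∈ t, r.length = 8) → s.length = t.length →
    pvKeyB s = pvKeyB t → s = t := by
  intro s
  induction s with
  | nil =>
    intro t _ _ hlen _
    cases t with
    | nil => rfl
    | cons b t' => simp at hlen
  | cons a s ih =>
    intro t hs ht hlen hk
    cases t with
    | nil => simp at hlen
    | cons b t' =>
      simp only [pvKeyB, List.flatMap_cons] at hk
      have hab : a.length = b.length := by
        rw [hs a (by simp), ht b (by simp)]
      obtain ⟨h1, h2⟩ := List.append_inj hk hab
      subst h1
      have := ih t' (fun r hr => hs r (by simp [hr])) (fun r hr => ht r (by simp [hr]))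
        (by simpa using hlen) h2
      rw [this]

theorem pvKeyB_eq_iff {s t : List (List Int)} (hs : pvShape8 s) (ht : pvShape8 t) :
    pvKeyB s = pvKeyB t ↔ s = t :=
  ⟨fun h => pv_flat_inj s t hs.2 ht.2 (hs.1.trans ht.1.symm) h, fun h => h ▸ rfl⟩

-- ---- generic findSome? helpers ----

theorem pv_findSome?_congr {α β : Type} (l : List α) (f g : α → Option β)
    (h : ∀ x ∈ l, f x = g x) : l.findSome? f = l.findSome? g := by
  induction l with
  | nil => rfl
  | cons a l ih =>
    rw [List.findSome?_cons, List.findSome?_cons, h a (by simp)]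
    cases hga : g a with
    | some b => rfl
    | none => exact ih (fun x hx => h x (by simp [hx]))

theorem pv_findSome?_unique {α β : Type} {l : List α} {f : α → Option β} {x : α}
    (hx : x ∈ l) (hother : ∀ y ∈ l, f y ≠ none → y = x) : l.findSome? f = f x := by
  induction l with
  | nil => cases hx
  | cons a l ih =>
    rw [List.findSome?_cons]
    cases hfa : f a with
    | some b =>
      have hax : a = x := hother a (by simp) (by simp [hfa])
      rw [← hax, hfa]
    | none =>
      rcases List.mem_cons.mp hx with rfl | hx'
      · rw [hfa]
        apply List.findSome?_eq_none_iff.mpr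
        intro y hy
        by_contra h
        have := hother y (by simp [hy]) h
        subst this
        exact h hfa
      · exact ih hx' (fun y hy h => hother y (by simp [hy]) h)

-- ---- zipIdx helpers ----

theorem pv_mem_of_zip {u : List (List (List Int))} {p : List (List Int) × Nat}
    (hp : p ∈ u.zipIdx) : p.1 ∈ u := by
  obtain ⟨x, i⟩ := p
  have h := List.mem_zipIdx hp
  simp only [Nat.sub_zero] at h
  obtain ⟨-, hi, hx⟩ := h
  show x ∈ u
  rw [hx]
  exact List.getElem_mem (by omega)

theorem pv_zip_unique {u : List (List (List Int))} (hnd : u.Nodup)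
    {p q : List (List Int) × Nat} (hp : p ∈ u.zipIdx) (hq : q ∈ u.zipIdx)
    (h : p.1 = q.1) : p = q := by
  obtain ⟨x, i⟩ := p
  obtain ⟨y, j⟩ := q
  simp only at h
  subst h
  have hpi := List.mk_mem_zipIdx_iff_getElem?.mp hp
  have hqj := List.mk_mem_zipIdx_iff_getElem?.mp hq
  obtain ⟨hi, hx⟩ := List.getElem?_eq_some_iff.mp hpi
  obtain ⟨hj, hy⟩ := List.getElem?_eq_some_iff.mp hqj
  have : i = j := (hnd.getElem_inj_iff).mp (hx.trans hy.symm)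
  simp [this]

theorem pv_mem_zip_of_mem {u : List (List (List Int))} {t : List (List Int)}
    (ht : t ∈ u) : ∃ p ∈ u.zipIdx, p.1 = t := by
  obtain ⟨i, hi, rfl⟩ := List.mem_iff_getElem.mp ht
  exact ⟨(u[i], i), List.mk_mem_zipIdx_iff_getElem?.mpr (List.getElem?_eq_getElem hi), rfl⟩

-- ---- characterizations of the two searches ----

theorem pvFlipSearchA_eq (d : PySem.Dict (List Int) Int) (t : List (List Int)) :
    ∀ L : List (Int × Int), pvFlipSearchA d t L =
      L.findSome? (fun hv => (d.get? (pvKeyA (pvFlip hv.1 hv.2 t))).map (fun i => (i, hv.1, hv.2)))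
  | [] => rfl
  | (hf, vf) :: rest => by
    rw [List.findSome?_cons]
    show (match d.get? (pvKeyA (pvFlip hf vf t)) with
      | some i => some (i, hf, vf)
      | none => pvFlipSearchA d t rest) = _
    cases h : d.get? (pvKeyA (pvFlip hf vf t)) with
    | some i => rfl
    | none => simpa using pvFlipSearchA_eq d t rest

theorem pv_get?_setdefault {ν : Type} (d : PySem.Dict (List Int) ν) (k key : List Int) (v : ν) :
    (d.setdefault k v).get? key = if key = k then (d.get? k).or (some v) else d.get? key := by
  unfold PySem.Dict.setdefault
  by_cases hc : d.contains k
  · rw [if_pos hc]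
    rw [PySem.Dict.contains_eq_isSome_get?] at hc
    by_cases hk : key = k
    · subst hk
      cases h : d.get? key with
      | some w => simp
      | none => rw [h] at hc; simp at hc
    · rw [if_neg hk]
  · rw [if_neg hc]
    have hfind : List.find? (fun p : (List Int) × ν => p.1 == key) (d.items ++ [(k, v)]) =
        (List.find? (fun p => p.1 == key) d.items).or (if k = key then some (k, v) else none) := by
      rw [List.find?_append]
      congr 1
      by_cases hk : k = key
      · subst hk; simp [List.find?]
      · simp [List.find?, beq_eq_false_iff_ne.mpr hk, hk]
    show Option.map (fun x => x.2) (List.find? (fun p => p.1 == key) (d.items ++ [(k, v)])) = _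
    rw [hfind]
    by_cases hk : key = k
    · subst hk
      have hnone : List.find? (fun p : (List Int) × ν => p.1 == key) d.items = none := by
        rw [List.find?_eq_none]
        intro p hp hbeq
        exact hc (List.any_eq_true.mpr ⟨p, hp, hbeq⟩)
      rw [hnone, if_pos rfl, if_pos rfl]
      have hg : d.get? key = none := by
        show Option.map (fun x => x.2) (List.find? (fun p => p.1 == key) d.items) = none
        rw [hnone]
        rfl
      rw [hg]
      simp
    · rw [if_neg (fun h => hk h.symm), if_neg hk, Option.or_none]
      rfl

theorem pv_sdfold (Q : List (List Int)) (idx : Int) :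
    ∀ (L : List (Int × Int)) (d : PySem.Dict (List Int) (Int × Int × Int)) (key : List Int),
      (L.foldl (fun d hv =>
        let t1 := if hv.1 ≠ 0 then Q.map List.reverse else Q
        let t2 := if hv.2 ≠ 0 then t1.reverse else t1
        d.setdefault (pvKeyB t2) (idx, hv.1, hv.2)) d).get? key
      = (d.get? key).or ((L.findSome? (fun hv =>
          if pvKeyB (pvFlip hv.1 hv.2 Q) = key then some hv else none)).map
            (fun hv => (idx, hv.1, hv.2)))
  | [], d, key => by simp
  | hv :: rest, d, key => by
    rw [List.foldl_cons, List.findSome?_cons, pv_sdfold Q idx rest _ key]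
    show ((d.setdefault (pvKeyB (pvFlip hv.1 hv.2 Q)) (idx, hv.1, hv.2)).get? key).or _ = _
    rw [pv_get?_setdefault]
    by_cases hk : pvKeyB (pvFlip hv.1 hv.2 Q) = key
    · rw [if_pos hk.symm, hk, if_pos rfl]
      cases d.get? key <;> simp
    · rw [if_neg (fun h => hk h.symm), if_neg hk]

theorem pvOrientInsertB_get? (Q : List (List Int)) (idx : Int)
    (d : PySem.Dict (List Int) (Int × Int × Int)) (key : List Int) :
    (pvOrientInsertB Q idx d).get? key
      = (d.get? key).or ((pvOrientOf Q key).map (fun hv => (idx, hv.1, hv.2))) := by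
  show ((pvFL.foldl (fun d hv =>
        let t1 := if hv.1 ≠ 0 then Q.map List.reverse else Q
        let t2 := if hv.2 ≠ 0 then t1.reverse else t1
        d.setdefault (pvKeyB t2) (idx, hv.1, hv.2)) d).get? key) = _
  rw [pv_sdfold]
  rfl

-- ---- appending a stored tile to the denotations ----

theorem pvLookA_append (u : List (List (List Int))) (Q : List (List Int)) (key : List Int) :
    pvLookA (u ++ [Q]) key
      = (pvLookA u key).or (if pvKeyB Q = key then some ((u.length : Nat) : Int) else none) := by
  unfold pvLookA
  rw [List.zipIdx_append, List.findSome?_append]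
  congr 1
  simp [List.zipIdx]

theorem pvLookB_append (u : List (List (List Int))) (Q : List (List Int)) (key : List Int) :
    pvLookB (u ++ [Q]) key
      = (pvLookB u key).or ((pvOrientOf Q key).map (fun hv => ((u.length : Int), hv.1, hv.2))) := by
  unfold pvLookB
  rw [List.zipIdx_append, List.findSome?_append]
  congr 1
  simp [List.zipIdx]

-- ---- uniqueness of the matching stored tile ----

theorem pv_unique {u : List (List (List Int))} {Q : List (List Int)}
    (hG : pvGood u) {p q : List (List Int) × Nat} {hvp hvq : Int × Int}
    (hp : p ∈ u.zipIdx) (hq : q ∈ u.zipIdx) (h1 : p.1 = pvFlip hvp.1 hvp.2 Q)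
    (h2 : q.1 = pvFlip hvq.1 hvq.2 Q) : p = q := by
  by_cases heq : p.1 = q.1
  · exact pv_zip_unique hG.2.1 hp hq heq
  · exfalso
    have hQ : Q = pvFlip hvp.1 hvp.2 p.1 := by
      rw [h1, pvFlip_flip]
    have hcomp : pvFlip (pvX hvp.1 hvq.1) (pvX hvp.2 hvq.2) p.1 = q.1 := by
      rw [← pvFlip_comp, ← hQ, ← h2]
    exact hG.2.2 p.1 (pv_mem_of_zip hp) q.1 (pv_mem_of_zip hq) heq
      (pvX hvp.1 hvq.1, pvX hvp.2 hvq.2) (pvX_pair_mem _ _ _ _) hcomp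

-- ---- the per-tile match equality ----

theorem pv_match_eq {u : List (List (List Int))} {dA : PySem.Dict (List Int) Int}
    {dB : PySem.Dict (List Int) (Int × Int × Int)} {Q : List (List Int)}
    (hG : pvGood u) (hA : pvInvA dA u) (hB : pvInvB dB u) (hQ : pvShape8 Q) :
    pvFlipSearchA dA Q pvFL = dB.get? (pvKeyB Q) := by
  have hshape : ∀ p ∈ u.zipIdx, pvShape8 (p.1 : List (List Int)) :=
    fun p hp => hG.1 _ (pv_mem_of_zip hp)
  rw [hB, pvFlipSearchA_eq]
  have hstep : ∀ hv ∈ pvFL,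
      (dA.get? (pvKeyA (pvFlip hv.1 hv.2 Q))).map (fun i => (i, hv.1, hv.2))
        = (pvLookA u (pvKeyB (pvFlip hv.1 hv.2 Q))).map (fun i => (i, hv.1, hv.2)) := by
    intro hv _; rw [hA, pvKeyA_eq]
  rw [pv_findSome?_congr _ _ _ hstep]
  by_cases hex : ∃ p ∈ u.zipIdx, ∃ hv ∈ pvFL, (p.1 : List (List Int)) = pvFlip hv.1 hv.2 Q
  · obtain ⟨p0, hp0, hv0, hv0m, hrel0⟩ := hex
    have huniq : ∀ q ∈ u.zipIdx, ∀ hv : Int × Int, (q.1 : List (List Int)) = pvFlip hv.1 hv.2 Q → q = p0 :=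
      fun q hq hv h => pv_unique hG hq hp0 h hrel0
    have hlookA : ∀ hv : Int × Int, pvLookA u (pvKeyB (pvFlip hv.1 hv.2 Q))
        = if p0.1 = pvFlip hv.1 hv.2 Q then some ((p0.2 : Nat) : Int) else none := by
      intro hv
      unfold pvLookA
      rw [pv_findSome?_unique hp0 ?_]
      · simp only [pvKeyB_eq_iff (hshape p0 hp0) (pvShape8_flip _ _ hQ)]
      · intro y hy hne
        by_cases hcon : (y.1 : List (List Int)) = pvFlip hv.1 hv.2 Q
        · exact huniq y hy hv hcon
        · exfalso
          apply hne
          rw [if_neg (fun h => hcon ((pvKeyB_eq_iff (hshape y hy) (pvShape8_flip _ _ hQ)).mp h))]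
    have hother : ∀ y ∈ u.zipIdx,
        (pvOrientOf y.1 (pvKeyB Q)).map (fun hv => ((y.2 : Int), hv.1, hv.2)) ≠ none → y = p0 := by
      intro y hy hne
      cases hOr : pvOrientOf y.1 (pvKeyB Q) with
      | none => rw [hOr] at hne; exact absurd rfl hne
      | some hv =>
        obtain ⟨hw, hwm, hfw⟩ := List.exists_of_findSome?_eq_some hOr
        by_cases hcond : pvKeyB (pvFlip hw.1 hw.2 y.1) = pvKeyB Q
        · have h1 : pvFlip hw.1 hw.2 y.1 = Q :=
            (pvKeyB_eq_iff (pvShape8_flip _ _ (hshape y hy)) hQ).mp hcond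
          exact huniq y hy hw ((pvFlip_eq_comm _ _ _ _).mp h1)
        · rw [if_neg hcond] at hfw
          exact absurd hfw (by simp)
    calc pvFL.findSome? (fun hv => (pvLookA u (pvKeyB (pvFlip hv.1 hv.2 Q))).map (fun i => (i, hv.1, hv.2)))
        = pvFL.findSome? (fun hv => if p0.1 = pvFlip hv.1 hv.2 Q
            then some (((p0.2 : Nat) : Int), hv.1, hv.2) else none) := by
          apply pv_findSome?_congr
          intro hv _
          rw [hlookA hv, Option.map_if]
      _ = pvLookB u (pvKeyB Q) := by
          unfold pvLookB
          rw [pv_findSome?_unique hp0 hother]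
          have hOr : pvOrientOf p0.1 (pvKeyB Q)
              = pvFL.findSome? (fun hv => if p0.1 = pvFlip hv.1 hv.2 Q then some hv else none) := by
            unfold pvOrientOf
            apply pv_findSome?_congr
            intro hv _
            have hiff : (pvKeyB (pvFlip hv.1 hv.2 p0.1) = pvKeyB Q) ↔ (p0.1 = pvFlip hv.1 hv.2 Q) := by
              rw [pvKeyB_eq_iff (pvShape8_flip _ _ (hshape p0 hp0)) hQ, pvFlip_eq_comm]
            simp only [hiff]
          rw [hOr, List.map_findSome?]
          apply pv_findSome?_congr
          intro hv _
          simp [Function.comp, Option.map_if]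
  · push Not at hex
    have hA0 : pvFL.findSome? (fun hv =>
        (pvLookA u (pvKeyB (pvFlip hv.1 hv.2 Q))).map (fun i => (i, hv.1, hv.2))) = none := by
      rw [List.findSome?_eq_none_iff]
      intro hv hvm
      have : pvLookA u (pvKeyB (pvFlip hv.1 hv.2 Q)) = none := by
        unfold pvLookA
        rw [List.findSome?_eq_none_iff]
        intro p hp
        rw [if_neg (fun h => hex p hp hv hvm
          ((pvKeyB_eq_iff (hshape p hp) (pvShape8_flip _ _ hQ)).mp h))]
      rw [this]
      rfl
    have hB0 : pvLookB u (pvKeyB Q) = none := by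
      unfold pvLookB
      rw [List.findSome?_eq_none_iff]
      intro p hp
      have : pvOrientOf p.1 (pvKeyB Q) = none := by
        unfold pvOrientOf
        rw [List.findSome?_eq_none_iff]
        intro hv hvm
        rw [if_neg]
        intro h
        have h1 : pvFlip hv.1 hv.2 p.1 = Q :=
          (pvKeyB_eq_iff (pvShape8_flip _ _ (hshape p hp)) hQ).mp h
        exact hex p hp hv hvm ((pvFlip_eq_comm _ _ _ _).mp h1)
      rw [this]
      rfl
    rw [hA0, hB0]

-- ---- storing a fresh tile preserves the invariants ----

theorem pv_store {u : List (List (List Int))} {dA : PySem.Dict (List Int) Int}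
    {dB : PySem.Dict (List Int) (Int × Int × Int)} {Q : List (List Int)}
    (hG : pvGood u) (hA : pvInvA dA u) (hB : pvInvB dB u) (hQ : pvShape8 Q)
    (hnone : pvFlipSearchA dA Q pvFL = none) :
    pvGood (u ++ [Q]) ∧ pvInvA (dA.insert (pvKeyA Q) ((u.length : Nat) : Int)) (u ++ [Q]) ∧
      pvInvB (pvOrientInsertB Q ((u.length : Nat) : Int) dB) (u ++ [Q]) := by
  have hshape : ∀ t ∈ u, pvShape8 t := hG.1
  have hnot : ∀ t ∈ u, ∀ hv ∈ pvFL, t ≠ pvFlip hv.1 hv.2 Q := by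
    intro t ht hv hvm
    rw [pvFlipSearchA_eq] at hnone
    rw [List.findSome?_eq_none_iff] at hnone
    have h1 := hnone hv hvm
    rw [Option.map_eq_none_iff, hA, pvKeyA_eq] at h1
    unfold pvLookA at h1
    rw [List.findSome?_eq_none_iff] at h1
    obtain ⟨p, hp, hpt⟩ := pv_mem_zip_of_mem ht
    have h2 := h1 p hp
    intro hcon
    rw [if_pos (by rw [hpt, hcon])] at h2
    exact absurd h2 (by simp)
  have hQnotin : Q ∉ u := by
    intro hmem
    exact hnot Q hmem (0, 0) (by simp [pvFL]) (by rw [pvFlip_zero])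
  refine ⟨⟨?_, ?_, ?_⟩, ?_, ?_⟩
  · intro t ht
    rcases List.mem_append.mp ht with h | h
    · exact hshape t h
    · simp at h; subst h; exact hQ
  · rw [List.nodup_append]
    refine ⟨hG.2.1, List.nodup_singleton _, ?_⟩
    intro a ha b hb
    simp only [List.mem_singleton] at hb
    subst hb
    intro h
    exact hQnotin (h ▸ ha)
  · intro t ht t' ht' hne hv hvm
    rcases List.mem_append.mp ht with h | h <;> rcases List.mem_append.mp ht' with h' | h'
    · exact hG.2.2 t h t' h' hne hv hvm
    · simp at h'; subst h'
      intro hcon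
      exact hnot t h hv hvm ((pvFlip_eq_comm _ _ _ _).mp hcon)
    · simp at h; subst h
      intro hcon
      exact hnot t' h' hv hvm hcon.symm
    · simp at h h'; subst h; subst h'; exact absurd rfl hne
  · intro key
    rw [pvKeyA_eq, PySem.Dict.get?_insert, pvLookA_append]
    by_cases hk : key = pvKeyB Q
    · rw [if_pos hk, hk, if_pos rfl]
      have : pvLookA u (pvKeyB Q) = none := by
        unfold pvLookA
        rw [List.findSome?_eq_none_iff]
        intro p hp
        rw [if_neg]
        intro h
        have h1 : (p.1 : List (List Int)) = Q :=
          (pvKeyB_eq_iff (hshape _ (pv_mem_of_zip hp)) hQ).mp h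
        exact hnot p.1 (pv_mem_of_zip hp) (0, 0) (by simp [pvFL]) (by rw [pvFlip_zero]; exact h1)
      rw [this]
      rfl
    · rw [if_neg hk, if_neg (fun h => hk h.symm), hA, Option.or_none]
  · intro key
    rw [pvOrientInsertB_get?, hB, pvLookB_append]

-- ---- tile extraction: B's slices equal A's index grid under Pre_ ----

theorem pv_row_slice (row : List Int) (tx : Nat) (hb : tx * 8 + 8 ≤ row.length) :
    PySem.List.slice row (some ((tx * 8 : Nat) : Int)) (some ((tx * 8 + 8 : Nat) : Int))
      = (List.range 8).map (fun x => row.getD (tx * 8 + x) 0) := by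
  rw [PySem.List.slice_natCast, show tx * 8 + 8 - tx * 8 = 8 by omega]
  apply List.ext_getElem
  · simp [List.length_take, List.length_drop]
    omega
  · intro x hx1 hx2
    have hx : x < 8 := by
      simp [List.length_take, List.length_drop] at hx1
      omega
    rw [List.getElem_take, List.getElem_drop, List.getElem_map, List.getElem_range,
      List.getD_eq_getElem row 0 (by omega)]

theorem pv_col_slice (pixels : List (List Int)) (ty : Nat) (hb : ty * 8 + 8 ≤ pixels.length) :
    PySem.List.slice pixels (some ((ty * 8 : Nat) : Int)) (some ((ty * 8 + 8 : Nat) : Int))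
      = (List.range 8).map (fun y => pixels.getD (ty * 8 + y) []) := by
  rw [PySem.List.slice_natCast, show ty * 8 + 8 - ty * 8 = 8 by omega]
  apply List.ext_getElem
  · simp [List.length_take, List.length_drop]
    omega
  · intro y hy1 hy2
    have hy : y < 8 := by
      simp [List.length_take, List.length_drop] at hy1
      omega
    rw [List.getElem_take, List.getElem_drop, List.getElem_map, List.getElem_range,
      List.getD_eq_getElem pixels [] (by omega)]

theorem pv_tile_eq (pixels : List (List Int)) (hPre : Pre_dedupe_tiles_8x8 pixels)
    (ty tx : Nat) (hty : ty < pixels.length / 8) (htx : tx < (pixels.headD []).length / 8) :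
    (pvTileOf pixels ty tx
      = (List.range 8).map (fun y => (List.range 8).map (fun x =>
          (pixels.getD (ty * 8 + y) []).getD (tx * 8 + x) 0))) ∧
    pvShape8 ((List.range 8).map (fun y => (List.range 8).map (fun x =>
          (pixels.getD (ty * 8 + y) []).getD (tx * 8 + x) 0))) := by
  have hdivmul : (pixels.length / 8) * 8 ≤ pixels.length := Nat.div_mul_le_self _ _
  have hrowlen : ty * 8 + 8 ≤ pixels.length := by
    have h2 : (ty + 1) * 8 ≤ (pixels.length / 8) * 8 := Nat.mul_le_mul_right _ hty
    omega
  have hrowbound : ∀ y : Nat, y < 8 → tx * 8 + 8 ≤ (pixels.getD (ty * 8 + y) []).length := by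
    intro y hy
    have hidx2 : ty * 8 + y < pixels.length := by omega
    rw [List.getD_eq_getElem pixels [] hidx2]
    have hlt : ty * 8 + y < (pixels.take (8 * (pixels.length / 8))).length := by
      simp [List.length_take]
      omega
    have hmem : pixels[ty * 8 + y]'hidx2 ∈ pixels.take (8 * (pixels.length / 8)) := by
      have hgt := List.getElem_take (xs := pixels) (j := 8 * (pixels.length / 8))
        (i := ty * 8 + y) (h := hlt)
      rw [← hgt]
      exact List.getElem_mem hlt
    have hcols := (hPre.2 _ hmem).1
    have h4 : (tx + 1) * 8 ≤ ((pixels.headD []).length / 8) * 8 := Nat.mul_le_mul_right _ htx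
    have h5 : ((pixels.headD []).length / 8) * 8 ≤ (pixels.headD []).length := Nat.div_mul_le_self _ _
    omega
  constructor
  · unfold pvTileOf
    rw [pv_col_slice pixels ty hrowlen, List.map_map]
    apply List.map_congr_left
    intro y hy
    simp only [Function.comp_apply]
    exact pv_row_slice _ tx (hrowbound y (List.mem_range.mp hy))
  · constructor
    · simp
    · intro r hr
      simp only [List.mem_map, List.mem_range] at hr
      obtain ⟨y, _, rfl⟩ := hr
      simp

-- ---- the fold-level equivalences (A's nested fold vs the nested B shape) ----

theorem pv_step (pixels : List (List Int)) (hPre : Pre_dedupe_tiles_8x8 pixels)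
    (ty tx : Nat) (hty : ty < pixels.length / 8) (htx : tx < (pixels.headD []).length / 8)
    (prow : List (Int × Int × Int)) (u : List (List (List Int)))
    (dA : PySem.Dict (List Int) Int) (dB : PySem.Dict (List Int) (Int × Int × Int))
    (hG : pvGood u) (hA : pvInvA dA u) (hB : pvInvB dB u) :
    (pvStepA pixels ty (prow, u, dA) tx).1 = (pvStepB pixels ty (prow, u, dB) tx).1 ∧
    (pvStepA pixels ty (prow, u, dA) tx).2.1 = (pvStepB pixels ty (prow, u, dB) tx).2.1 ∧
    pvGood (pvStepA pixels ty (prow, u, dA) tx).2.1 ∧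
    pvInvA (pvStepA pixels ty (prow, u, dA) tx).2.2 (pvStepA pixels ty (prow, u, dA) tx).2.1 ∧
    pvInvB (pvStepB pixels ty (prow, u, dB) tx).2.2 (pvStepA pixels ty (prow, u, dA) tx).2.1 := by
  obtain ⟨htile, hQ⟩ := pv_tile_eq pixels hPre ty tx hty htx
  unfold pvStepA pvStepB
  rw [htile]
  rw [show ([((0 : Int), (0 : Int)), (0, 1), (1, 0), (1, 1)] : List (Int × Int)) = pvFL from rfl]
  rw [pv_match_eq hG hA hB hQ]
  cases hm : dB.get? (pvKeyB ((List.range 8).map (fun y => (List.range 8).map (fun x =>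
      (pixels.getD (ty * 8 + y) []).getD (tx * 8 + x) 0)))) with
  | some m =>
    exact ⟨rfl, rfl, hG, hA, hB⟩
  | none =>
    have hnone : pvFlipSearchA dA ((List.range 8).map (fun y => (List.range 8).map (fun x =>
        (pixels.getD (ty * 8 + y) []).getD (tx * 8 + x) 0))) pvFL = none := by
      rw [pv_match_eq hG hA hB hQ, hm]
    obtain ⟨hG', hA', hB'⟩ := pv_store hG hA hB hQ hnone
    exact ⟨rfl, rfl, hG', hA', hB'⟩

theorem pv_inner (pixels : List (List Int)) (hPre : Pre_dedupe_tiles_8x8 pixels)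
    (ty : Nat) (hty : ty < pixels.length / 8) :
    ∀ (LX : List Nat), (∀ tx ∈ LX, tx < (pixels.headD []).length / 8) →
    ∀ (prow : List (Int × Int × Int)) (u : List (List (List Int)))
      (dA : PySem.Dict (List Int) Int) (dB : PySem.Dict (List Int) (Int × Int × Int)),
      pvGood u → pvInvA dA u → pvInvB dB u →
      (LX.foldl (pvStepA pixels ty) (prow, u, dA)).1 = (LX.foldl (pvStepB pixels ty) (prow, u, dB)).1 ∧
      (LX.foldl (pvStepA pixels ty) (prow, u, dA)).2.1 = (LX.foldl (pvStepB pixels ty) (prow, u, dB)).2.1 ∧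
      pvGood (LX.foldl (pvStepA pixels ty) (prow, u, dA)).2.1 ∧
      pvInvA (LX.foldl (pvStepA pixels ty) (prow, u, dA)).2.2 (LX.foldl (pvStepA pixels ty) (prow, u, dA)).2.1 ∧
      pvInvB (LX.foldl (pvStepB pixels ty) (prow, u, dB)).2.2 (LX.foldl (pvStepA pixels ty) (prow, u, dA)).2.1 := by
  intro LX
  induction LX with
  | nil =>
    intro _ prow u dA dB hG hA hB
    exact ⟨rfl, rfl, hG, hA, hB⟩
  | cons tx LX ih =>
    intro hbnd prow u dA dB hG hA hB
    have htx : tx < (pixels.headD []).length / 8 := hbnd tx (by simp)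
    obtain ⟨e1, e2, hG', hA', hB'⟩ := pv_step pixels hPre ty tx hty htx prow u dA dB hG hA hB
    rw [List.foldl_cons, List.foldl_cons]
    have hsB : pvStepB pixels ty (prow, u, dB) tx =
        ((pvStepA pixels ty (prow, u, dA) tx).1, (pvStepA pixels ty (prow, u, dA) tx).2.1,
         (pvStepB pixels ty (prow, u, dB) tx).2.2) := by
      rw [e1, e2]
    rw [hsB]
    exact ih (fun t ht => hbnd t (by simp [ht])) (pvStepA pixels ty (prow, u, dA) tx).1
      (pvStepA pixels ty (prow, u, dA) tx).2.1 (pvStepA pixels ty (prow, u, dA) tx).2.2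
      (pvStepB pixels ty (prow, u, dB) tx).2.2 hG' hA' hB'

theorem pv_outer (pixels : List (List Int)) (hPre : Pre_dedupe_tiles_8x8 pixels) :
    ∀ (LT : List Nat), (∀ ty ∈ LT, ty < pixels.length / 8) →
    ∀ (uA : List (List (List Int))) (dA : PySem.Dict (List Int) Int)
      (dB : PySem.Dict (List Int) (Int × Int × Int)) (plc : List (List (Int × Int × Int))),
      pvGood uA → pvInvA dA uA → pvInvB dB uA →
      (LT.foldl (pvRowA pixels) (uA, dA, plc)).1 = (LT.foldl (pvRowB pixels) (uA, dB, plc)).1 ∧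
      (LT.foldl (pvRowA pixels) (uA, dA, plc)).2.2 = (LT.foldl (pvRowB pixels) (uA, dB, plc)).2.2 ∧
      pvGood (LT.foldl (pvRowA pixels) (uA, dA, plc)).1 ∧
      pvInvA (LT.foldl (pvRowA pixels) (uA, dA, plc)).2.1 (LT.foldl (pvRowA pixels) (uA, dA, plc)).1 ∧
      pvInvB (LT.foldl (pvRowB pixels) (uA, dB, plc)).2.1 (LT.foldl (pvRowA pixels) (uA, dA, plc)).1 := by
  intro LT
  induction LT with
  | nil =>
    intro _ uA dA dB plc hG hA hB
    exact ⟨rfl, rfl, hG, hA, hB⟩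
  | cons ty LT ih =>
    intro hbnd uA dA dB plc hG hA hB
    have hty : ty < pixels.length / 8 := hbnd ty (by simp)
    rw [List.foldl_cons, List.foldl_cons]
    obtain ⟨h1, h2, hG', hA', hB'⟩ := pv_inner pixels hPre ty hty
      (List.range ((pixels.headD []).length / 8)) (fun tx htx => List.mem_range.mp htx)
      [] uA dA dB hG hA hB
    have hrow : pvRowA pixels (uA, dA, plc) ty =
        (((List.range ((pixels.headD []).length / 8)).foldl (pvStepA pixels ty) ([], uA, dA)).2.1,
         ((List.range ((pixels.headD []).length / 8)).foldl (pvStepA pixels ty) ([], uA, dA)).2.2,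
         plc ++ [((List.range ((pixels.headD []).length / 8)).foldl (pvStepA pixels ty) ([], uA, dA)).1]) := rfl
    have hrowB : pvRowB pixels (uA, dB, plc) ty =
        (((List.range ((pixels.headD []).length / 8)).foldl (pvStepA pixels ty) ([], uA, dA)).2.1,
         ((List.range ((pixels.headD []).length / 8)).foldl (pvStepB pixels ty) ([], uA, dB)).2.2,
         plc ++ [((List.range ((pixels.headD []).length / 8)).foldl (pvStepA pixels ty) ([], uA, dA)).1]) := by
      show (((List.range ((pixels.headD []).length / 8)).foldl (pvStepB pixels ty) ([], uA, dB)).2.1,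
         ((List.range ((pixels.headD []).length / 8)).foldl (pvStepB pixels ty) ([], uA, dB)).2.2,
         plc ++ [((List.range ((pixels.headD []).length / 8)).foldl (pvStepB pixels ty) ([], uA, dB)).1]) = _
      rw [← h1, ← h2]
    rw [hrow, hrowB]
    exact ih (fun t ht => hbnd t (by simp [ht]))
      ((List.range ((pixels.headD []).length / 8)).foldl (pvStepA pixels ty) ([], uA, dA)).2.1
      ((List.range ((pixels.headD []).length / 8)).foldl (pvStepA pixels ty) ([], uA, dA)).2.2
      ((List.range ((pixels.headD []).length / 8)).foldl (pvStepB pixels ty) ([], uA, dB)).2.2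
      (plc ++ [((List.range ((pixels.headD []).length / 8)).foldl (pvStepA pixels ty) ([], uA, dA)).1])
      hG' hA' hB'

theorem pvGood_nil : pvGood [] := ⟨by simp, List.nodup_nil, by simp⟩

theorem pvInvA_empty : pvInvA PySem.Dict.empty [] := by
  intro key
  simp [pvLookA, PySem.Dict.get?_empty, List.zipIdx]

theorem pvInvB_empty : pvInvB PySem.Dict.empty [] := by
  intro key
  simp [pvLookB, PySem.Dict.get?_empty, List.zipIdx]

theorem pv_unfoldA (pixels : List (List Int)) :
    dedupe_tiles_8x8 pixels =
      (((List.range (pixels.length / 8)).foldl (pvRowA pixels) ([], PySem.Dict.empty, [])).1,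
       ((List.range (pixels.length / 8)).foldl (pvRowA pixels) ([], PySem.Dict.empty, [])).2.2) := rfl

-- ---- bridging the staged port B to the nested pvRowB fold ----

-- fold over a flatMap is the nested fold
theorem pv_foldl_flatMap {α β σ : Type} (l : List α) (f : α → List β) (g : σ → β → σ) :
    ∀ s : σ, (l.flatMap f).foldl g s = l.foldl (fun s a => (f a).foldl g s) s := by
  induction l with
  | nil => intro s; rfl
  | cons a l ih => intro s; rw [List.flatMap_cons, List.foldl_append, List.foldl_cons, ih]

-- the prow component of the nested B fold accumulates by appending
theorem pvStepB_shift (pixels : List (List Int)) (ty : Nat) :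
    ∀ (L : List Nat) (p0 : List (Int × Int × Int)) (u : List (List (List Int)))
      (d : PySem.Dict (List Int) (Int × Int × Int)),
      L.foldl (pvStepB pixels ty) (p0, u, d)
        = (p0 ++ (L.foldl (pvStepB pixels ty) ([], u, d)).1,
           (L.foldl (pvStepB pixels ty) ([], u, d)).2) := by
  intro L
  induction L with
  | nil => intro p0 u d; simp
  | cons tx L ih =>
    intro p0 u d
    rw [List.foldl_cons, List.foldl_cons]
    cases hm : d.get? (pvKeyB (pvTileOf pixels ty tx)) with
    | some p =>
      have h1 : pvStepB pixels ty (p0, u, d) tx = (p0 ++ [p], u, d) := by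
        simp [pvStepB, hm]
      have h2 : pvStepB pixels ty ([], u, d) tx = ([p], u, d) := by
        simp [pvStepB, hm]
      rw [h1, h2, ih (p0 ++ [p]), ih [p]]
      simp
    | none =>
      have h1 : pvStepB pixels ty (p0, u, d) tx
          = (p0 ++ [((u.length : Int), 0, 0)], u ++ [pvTileOf pixels ty tx],
             pvOrientInsertB (pvTileOf pixels ty tx) (u.length : Int) d) := by
        simp [pvStepB, hm]
      have h2 : pvStepB pixels ty ([], u, d) tx
          = ([((u.length : Int), 0, 0)], u ++ [pvTileOf pixels ty tx],
             pvOrientInsertB (pvTileOf pixels ty tx) (u.length : Int) d) := by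
        simp [pvStepB, hm]
      rw [h1, h2, ih (p0 ++ [((u.length : Int), 0, 0)]), ih [((u.length : Int), 0, 0)]]
      simp

-- one row of the single resolving pass equals one nested inner fold with the flat list appended
theorem pv_resolve_row (pixels : List (List Int)) (ty : Nat) :
    ∀ (L : List Nat) (u : List (List (List Int)))
      (d : PySem.Dict (List Int) (Int × Int × Int)) (flat : List (Int × Int × Int)),
      L.foldl (fun st tx => pvResolveB st (pvTileOf pixels ty tx)) (u, d, flat)
        = ((L.foldl (pvStepB pixels ty) ([], u, d)).2.1,
           (L.foldl (pvStepB pixels ty) ([], u, d)).2.2,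
           flat ++ (L.foldl (pvStepB pixels ty) ([], u, d)).1) := by
  intro L
  induction L with
  | nil => intro u d flat; simp
  | cons tx L ih =>
    intro u d flat
    rw [List.foldl_cons, List.foldl_cons]
    cases hm : d.get? (pvKeyB (pvTileOf pixels ty tx)) with
    | some p =>
      have h1 : pvResolveB (u, d, flat) (pvTileOf pixels ty tx) = (u, d, flat ++ [p]) := by
        simp [pvResolveB, hm]
      have h2 : pvStepB pixels ty ([], u, d) tx = ([p], u, d) := by
        simp [pvStepB, hm]
      rw [h1, h2, ih u d (flat ++ [p]), pvStepB_shift pixels ty L [p]]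
      simp
    | none =>
      have h1 : pvResolveB (u, d, flat) (pvTileOf pixels ty tx)
          = (u ++ [pvTileOf pixels ty tx],
             pvOrientInsertB (pvTileOf pixels ty tx) (u.length : Int) d,
             flat ++ [((u.length : Int), 0, 0)]) := by
        simp [pvResolveB, hm]
      have h2 : pvStepB pixels ty ([], u, d) tx
          = ([((u.length : Int), 0, 0)], u ++ [pvTileOf pixels ty tx],
             pvOrientInsertB (pvTileOf pixels ty tx) (u.length : Int) d) := by
        simp [pvStepB, hm]
      rw [h1, h2, ih (u ++ [pvTileOf pixels ty tx])
        (pvOrientInsertB (pvTileOf pixels ty tx) (u.length : Int) d)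
        (flat ++ [((u.length : Int), 0, 0)]),
        pvStepB_shift pixels ty L [((u.length : Int), 0, 0)]]
      simp

-- the whole single pass equals the nested fold with the placement rows flattened
theorem pv_resolve_all (pixels : List (List Int)) :
    ∀ (LT : List Nat) (u : List (List (List Int)))
      (d : PySem.Dict (List Int) (Int × Int × Int)) (plc : List (List (Int × Int × Int))),
      LT.foldl (fun st ty => ((List.range ((pixels.headD []).length / 8)).map (pvTileOf pixels ty)).foldl pvResolveB st)
        (u, d, plc.flatten)
        = ((LT.foldl (pvRowB pixels) (u, d, plc)).1,
           (LT.foldl (pvRowB pixels) (u, d, plc)).2.1,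
           (LT.foldl (pvRowB pixels) (u, d, plc)).2.2.flatten) := by
  intro LT
  induction LT with
  | nil => intro u d plc; rfl
  | cons ty LT ih =>
    intro u d plc
    rw [List.foldl_cons, List.foldl_cons]
    have hmap : ((List.range ((pixels.headD []).length / 8)).map (pvTileOf pixels ty)).foldl pvResolveB
        (u, d, plc.flatten)
        = (List.range ((pixels.headD []).length / 8)).foldl
            (fun st tx => pvResolveB st (pvTileOf pixels ty tx)) (u, d, plc.flatten) := by
      rw [List.foldl_map]
    rw [hmap, pv_resolve_row]
    have hrowB : pvRowB pixels (u, d, plc) ty =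
        (((List.range ((pixels.headD []).length / 8)).foldl (pvStepB pixels ty) ([], u, d)).2.1,
         ((List.range ((pixels.headD []).length / 8)).foldl (pvStepB pixels ty) ([], u, d)).2.2,
         plc ++ [((List.range ((pixels.headD []).length / 8)).foldl (pvStepB pixels ty) ([], u, d)).1]) := rfl
    rw [hrowB]
    have hflat : (plc ++ [((List.range ((pixels.headD []).length / 8)).foldl (pvStepB pixels ty) ([], u, d)).1]).flatten
        = plc.flatten ++ ((List.range ((pixels.headD []).length / 8)).foldl (pvStepB pixels ty) ([], u, d)).1 := by
      simp
    rw [← hflat, ih]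

-- every placement row produced by the nested B fold has length cols, and rows accumulate one by one
theorem pv_innerB_len (pixels : List (List Int)) (ty : Nat) :
    ∀ (L : List Nat) (u : List (List (List Int))) (d : PySem.Dict (List Int) (Int × Int × Int)),
      (L.foldl (pvStepB pixels ty) ([], u, d)).1.length = L.length := by
  intro L
  induction L with
  | nil => intro u d; rfl
  | cons tx L ih =>
    intro u d
    rw [List.foldl_cons]
    cases hm : d.get? (pvKeyB (pvTileOf pixels ty tx)) with
    | some p =>
      have h2 : pvStepB pixels ty ([], u, d) tx = ([p], u, d) := by
        simp [pvStepB, hm]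
      rw [h2, pvStepB_shift pixels ty L [p]]
      simp [ih]
    | none =>
      have h2 : pvStepB pixels ty ([], u, d) tx
          = ([((u.length : Int), 0, 0)], u ++ [pvTileOf pixels ty tx],
             pvOrientInsertB (pvTileOf pixels ty tx) (u.length : Int) d) := by
        simp [pvStepB, hm]
      rw [h2, pvStepB_shift pixels ty L [((u.length : Int), 0, 0)]]
      simp [ih]

theorem pv_outerB_rows (pixels : List (List Int)) :
    ∀ (LT : List Nat) (u : List (List (List Int))) (d : PySem.Dict (List Int) (Int × Int × Int))
      (plc : List (List (Int × Int × Int))),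
      (LT.foldl (pvRowB pixels) (u, d, plc)).2.2.length = plc.length + LT.length ∧
      (∀ r ∈ (LT.foldl (pvRowB pixels) (u, d, plc)).2.2,
        r ∈ plc ∨ r.length = (pixels.headD []).length / 8) := by
  intro LT
  induction LT with
  | nil =>
    intro u d plc
    exact ⟨by simp, fun r hr => Or.inl hr⟩
  | cons ty LT ih =>
    intro u d plc
    rw [List.foldl_cons]
    have hrowB : pvRowB pixels (u, d, plc) ty =
        (((List.range ((pixels.headD []).length / 8)).foldl (pvStepB pixels ty) ([], u, d)).2.1,
         ((List.range ((pixels.headD []).length / 8)).foldl (pvStepB pixels ty) ([], u, d)).2.2,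
         plc ++ [((List.range ((pixels.headD []).length / 8)).foldl (pvStepB pixels ty) ([], u, d)).1]) := rfl
    rw [hrowB]
    obtain ⟨hl, hm⟩ := ih
      ((List.range ((pixels.headD []).length / 8)).foldl (pvStepB pixels ty) ([], u, d)).2.1
      ((List.range ((pixels.headD []).length / 8)).foldl (pvStepB pixels ty) ([], u, d)).2.2
      (plc ++ [((List.range ((pixels.headD []).length / 8)).foldl (pvStepB pixels ty) ([], u, d)).1])
    constructor
    · rw [hl]; simp; omega
    · intro r hr
      rcases hm r hr with h | h
      · rcases List.mem_append.mp h with h' | h'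
        · exact Or.inl h'
        · simp only [List.mem_singleton] at h'
          subst h'
          exact Or.inr (by rw [pv_innerB_len]; simp)
      · exact Or.inr h

-- chunking the flattened rows recovers the rows
theorem pv_chunk_get {α : Type} (cols : Nat) :
    ∀ (plc : List (List α)) (i : Nat), (∀ r ∈ plc, r.length = cols) → i < plc.length →
      (plc.flatten.drop (i * cols)).take cols = plc.getD i [] := by
  intro plc
  induction plc with
  | nil => intro i _ h; simp at h
  | cons r rest ih =>
    intro i hlen hi
    cases i with
    | zero =>
      simp only [Nat.zero_mul, List.drop_zero, List.flatten_cons, List.getD]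
      rw [List.take_append_of_le_length (by rw [hlen r (by simp)]),
        List.take_of_length_le (by rw [hlen r (by simp)])]
      rfl
    | succ i =>
      have hr : r.length = cols := hlen r (by simp)
      have hdrop : (r ++ rest.flatten).drop ((i + 1) * cols)
          = rest.flatten.drop (i * cols) := by
        rw [show (i + 1) * cols = r.length + i * cols by rw [hr]; ring, List.drop_append,
          List.drop_eq_nil_of_le (by omega), Nat.add_sub_cancel_left, List.nil_append]
      simp only [List.flatten_cons, List.getD]
      rw [hdrop]
      have := ih i (fun x hx => hlen x (by simp [hx])) (by simpa using hi)
      simpa [List.getD] using this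

theorem pv_chunk {α : Type} (cols : Nat) (flat : List α) (plc : List (List α))
    (hflat : flat = plc.flatten) (hlen : ∀ r ∈ plc, r.length = cols) :
    (List.range plc.length).map (fun i =>
      PySem.List.slice flat (some ((i * cols : Nat) : Int)) (some ((i * cols + cols : Nat) : Int))) = plc := by
  subst hflat
  apply List.ext_getElem
  · simp
  · intro i hi1 hi2
    simp only [List.getElem_map, List.getElem_range]
    rw [PySem.List.slice_natCast, show i * cols + cols - i * cols = cols by omega]
    have := pv_chunk_get cols plc i hlen (by simpa using hi2)
    rw [this, List.getD_eq_getElem plc [] (by simpa using hi2)]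

-- the staged port equals the nested fold's (unique, flattened-rows-chunked) pair
theorem pv_unfoldB (pixels : List (List Int)) :
    dedupe_tiles_8x8_alt pixels =
      (((List.range (pixels.length / 8)).foldl (pvRowB pixels) ([], PySem.Dict.empty, [])).1,
       ((List.range (pixels.length / 8)).foldl (pvRowB pixels) ([], PySem.Dict.empty, [])).2.2) := by
  have hres : ((List.range (pixels.length / 8)).flatMap (fun ty =>
      (List.range ((pixels.headD []).length / 8)).map (pvTileOf pixels ty))).foldl pvResolveB
      ([], PySem.Dict.empty, ([] : List (Int × Int × Int)))
      = (((List.range (pixels.length / 8)).foldl (pvRowB pixels) ([], PySem.Dict.empty, [])).1,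
         ((List.range (pixels.length / 8)).foldl (pvRowB pixels) ([], PySem.Dict.empty, [])).2.1,
         ((List.range (pixels.length / 8)).foldl (pvRowB pixels) ([], PySem.Dict.empty, [])).2.2.flatten) := by
    rw [pv_foldl_flatMap]
    have := pv_resolve_all pixels (List.range (pixels.length / 8)) [] PySem.Dict.empty []
    simpa using this
  show ((((List.range (pixels.length / 8)).flatMap (fun ty =>
      (List.range ((pixels.headD []).length / 8)).map (pvTileOf pixels ty))).foldl pvResolveB
      ([], PySem.Dict.empty, [])).1,
    (List.range (pixels.length / 8)).map (fun i =>
      PySem.List.slice (((List.range (pixels.length / 8)).flatMap (fun ty =>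
        (List.range ((pixels.headD []).length / 8)).map (pvTileOf pixels ty))).foldl pvResolveB
        ([], PySem.Dict.empty, [])).2.2
        (some ((i * ((pixels.headD []).length / 8) : Nat) : Int))
        (some ((i * ((pixels.headD []).length / 8) + ((pixels.headD []).length / 8) : Nat) : Int)))) = _
  rw [hres]
  obtain ⟨hrows, hrlen⟩ := pv_outerB_rows pixels (List.range (pixels.length / 8))
    [] PySem.Dict.empty []
  have hnrows : ((List.range (pixels.length / 8)).foldl (pvRowB pixels) ([], PySem.Dict.empty, [])).2.2.length
      = pixels.length / 8 := by rw [hrows]; simp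
  have hchunk := pv_chunk ((pixels.headD []).length / 8)
    (((List.range (pixels.length / 8)).foldl (pvRowB pixels) ([], PySem.Dict.empty, [])).2.2.flatten)
    (((List.range (pixels.length / 8)).foldl (pvRowB pixels) ([], PySem.Dict.empty, [])).2.2)
    rfl
    (fun r hr => by rcases hrlen r hr with h | h <;> simp_all)
  rw [hnrows] at hchunk
  exact congrArg _ hchunk

-- ===== VERDICT (by name: the statement is the Claim_ definition above) =====
theorem dedupe_tiles_8x8_spec : Claim_equal_dedupe_tiles_8x8 := by
  intro pixels _ hPre
  unfold Spec_dedupe_tiles_8x8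
  obtain ⟨h1, h2, -, -, -⟩ := pv_outer pixels hPre (List.range (pixels.length / 8))
    (fun ty hty => List.mem_range.mp hty) [] PySem.Dict.empty PySem.Dict.empty []
    pvGood_nil pvInvA_empty pvInvB_empty
  rw [pv_unfoldA, pv_unfoldB, h1, h2]
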